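-- pv_equiv track=rewrite | github.com/danwyry/redes-neuronales-lds-unq-2019 | tp1_quixo/tests/test_h.py | _in_improvement
-- ===== SOURCE A (Python) =====
-- def _in_improvement(s, xxs, pps, nns, l, i, pl):
--     if len(xxs) == 0:
--         return l == s
--     x,xs  = xxs[0], xxs[1:]
--     p,ps  = pps[0], pps[1:]
--     n,ns  = nns[0], nns[1:]
--     if l == s:
--         return True
--     else:
--         if len(xxs) < l-s:
--             return False
--         else:
--             if pl == x:
--                 return _in_improvement(s + 1, xs, ps, ns, l, i, pl)
--             else:
--                 return _calc_is_one_move_improvable(xxs, pps, nns, i, i, pl)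
--
-- def _calc_is_one_move_improvable(xxs, pps, nns, l, i, pl):
--     if len(xxs) == 0:
--         return l == 0
--     x,xs  = xxs[0], xxs[1:]
--     p,ps  = pps[0], pps[1:]
--     n,ns  = nns[0], nns[1:]
--     if len(xxs) <= l:
--         return False
--     if x == pl:
--         return _calc_is_one_move_improvable(xs, ps, ns, (l - 1), i, pl)
--     else :
--         if (p == pl or n == pl):
--             return _in_improvement(0, xs, ps, ns, l, i, pl)
--         else:
--             return _calc_is_one_move_improvable(xs, ps, ns, i, i, pl)
-- ===== SOURCE B (Python) =====
-- def _in_improvement(s, xxs, pps, nns, l, i, pl):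
--     # single explicit loop (state machine) replacing the mutual tail recursion:
--     # imp=True is the improvement scan (counter s), imp=False the one-move scan (counter c)
--     imp = True
--     c = 0
--     while True:
--         if imp:
--             if not xxs:
--                 return l == s
--             if l == s:
--                 return True
--             if len(xxs) < l - s:
--                 return False
--             if pl == xxs[0]:
--                 s += 1
--                 xxs, pps, nns = xxs[1:], pps[1:], nns[1:]
--             else:
--                 imp, c = False, i
--         else:
--             if not xxs:
--                 return c == 0
--             if len(xxs) <= c:
--                 return False
--             if xxs[0] == pl:
--                 c -= 1
--             elif pps[0] == pl or nns[0] == pl: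
--                 imp, s, l = True, 0, c
--             else:
--                 c = i
--             xxs, pps, nns = xxs[1:], pps[1:], nns[1:]
-- ===== Notes on version B (the rewrite author's own statement) =====
-- stated objective: alternative
-- what changed: B replaces the mutual tail recursion of _in_improvement/_calc_is_one_move_improvable by a single explicit while-loop state machine: a boolean mode flag with counters (imp scan with s, one-move scan with c) drives one loop that pops the heads of the three lists, instead of two functions calling each other.
-- outside the precondition, e.g. on _in_improvement(0, [1, 2], [5], [5], 0, 0, 0): A returns True, B returns True
import Mathlib
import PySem

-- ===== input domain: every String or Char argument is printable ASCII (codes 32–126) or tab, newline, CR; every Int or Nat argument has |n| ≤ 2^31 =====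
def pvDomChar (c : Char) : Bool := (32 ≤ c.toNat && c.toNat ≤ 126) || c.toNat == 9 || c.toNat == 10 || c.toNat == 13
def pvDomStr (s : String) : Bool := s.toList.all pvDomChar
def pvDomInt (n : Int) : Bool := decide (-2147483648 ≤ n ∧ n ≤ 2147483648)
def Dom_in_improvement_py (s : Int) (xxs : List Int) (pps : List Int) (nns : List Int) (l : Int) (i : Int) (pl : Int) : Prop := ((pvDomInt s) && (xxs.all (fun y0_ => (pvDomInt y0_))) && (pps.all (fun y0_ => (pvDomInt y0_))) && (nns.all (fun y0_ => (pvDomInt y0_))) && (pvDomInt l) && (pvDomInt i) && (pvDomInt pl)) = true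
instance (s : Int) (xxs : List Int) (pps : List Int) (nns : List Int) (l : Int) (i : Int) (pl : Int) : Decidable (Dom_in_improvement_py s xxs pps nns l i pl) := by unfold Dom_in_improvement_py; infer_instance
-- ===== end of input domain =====

-- B collapses the mutual tail recursion of _in_improvement/_calc_is_one_move_improvable into
-- one explicit loop over a two-constructor state (objective: alternative decomposition, same cost).

-- ===== PORT A =====
-- A's recursive case also binds p := pps[0] and n := nns[0] in _in_improvement but never uses
-- them; the bindings only matter because they raise IndexError on short pps/nns (hence Pre_).
mutual
def in_improvement_py (s : Int) (xxs : List Int) (pps : List Int) (nns : List Int) (l : Int) (i : Int) (pl : Int) : Bool :=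
  match xxs with
  | [] => decide (l = s)
  | x :: xs =>
    let ps := pps.tail
    let ns := nns.tail
    if l = s then true
    else if (((x :: xs).length : Int) < l - s) then false
    else if pl = x then in_improvement_py (s + 1) xs ps ns l i pl
    else calc_one_move_improvable (x :: xs) pps nns i i pl
termination_by 2 * xxs.length + 1
decreasing_by all_goals ((try simp only [List.length_cons]); omega)

def calc_one_move_improvable (xxs : List Int) (pps : List Int) (nns : List Int) (l : Int) (i : Int) (pl : Int) : Bool :=
  match xxs with
  | [] => decide (l = 0)
  | x :: xs =>
    let p := pps.headD 0
    let ps := pps.tail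
    let n := nns.headD 0
    let ns := nns.tail
    if (((x :: xs).length : Int) ≤ l) then false
    else if x = pl then calc_one_move_improvable xs ps ns (l - 1) i pl
    else if p = pl ∨ n = pl then in_improvement_py 0 xs ps ns l i pl
    else calc_one_move_improvable xs ps ns i i pl
termination_by 2 * xxs.length
decreasing_by all_goals ((try simp only [List.length_cons]); omega)
end

-- ===== PORT B =====
-- Source B's boolean flag `imp` with counters becomes a two-constructor state:
-- .imp s l is imp=True (counters s, l), .cal c is imp=False (counter c).
inductive PvMode : Type
  | imp : Int → Int → PvMode
  | cal : Int → PvMode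

-- the `while True` loop of Source B; the list reassignments are the tail/headD steps
def pvLoop (st : PvMode) (xxs pps nns : List Int) (i pl : Int) : Bool :=
  match st, xxs with
  | .imp s l, [] => decide (l = s)
  | .imp s l, x :: xs =>
    if l = s then true
    else if (((x :: xs).length : Int) < l - s) then false
    else if pl = x then pvLoop (.imp (s + 1) l) xs pps.tail nns.tail i pl
    else pvLoop (.cal i) (x :: xs) pps nns i pl
  | .cal c, [] => decide (c = 0)
  | .cal c, x :: xs =>
    if (((x :: xs).length : Int) ≤ c) then false
    else if x = pl then pvLoop (.cal (c - 1)) xs pps.tail nns.tail i pl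
    else if pps.headD 0 = pl ∨ nns.headD 0 = pl then pvLoop (.imp 0 c) xs pps.tail nns.tail i pl
    else pvLoop (.cal i) xs pps.tail nns.tail i pl
termination_by 2 * xxs.length + (match st with | .imp _ _ => 1 | .cal _ => 0)
decreasing_by all_goals ((try simp only [List.length_cons]); omega)

def in_improvement_py_alt (s : Int) (xxs : List Int) (pps : List Int) (nns : List Int) (l : Int) (i : Int) (pl : Int) : Bool :=
  pvLoop (.imp s l) xxs pps nns i pl

-- ===== PRECONDITION & SPEC =====
-- A reads pps[0] and nns[0] whenever xxs is nonempty and recurses on all three tails in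
-- lockstep, so it raises IndexError when pps or nns is shorter than xxs; Pre_ excludes all
-- shorter pps/nns (on a few of those inputs A still returns before the lists run out — see
-- the cite — but that survival is an accident of which guard fires first).
def Pre_in_improvement_py (s : Int) (xxs : List Int) (pps : List Int) (nns : List Int) (l : Int) (i : Int) (pl : Int) : Prop :=
  xxs.length ≤ pps.length ∧ xxs.length ≤ nns.length
instance (s : Int) (xxs : List Int) (pps : List Int) (nns : List Int) (l : Int) (i : Int) (pl : Int) : Decidable (Pre_in_improvement_py s xxs pps nns l i pl) := by unfold Pre_in_improvement_py; infer_instance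

def pvWitness_in_improvement_py : Int × List Int × List Int × List Int × Int × Int × Int := (0, [1], [2], [3], 1, 0, 1)

def Spec_in_improvement_py (s : Int) (xxs : List Int) (pps : List Int) (nns : List Int) (l : Int) (i : Int) (pl : Int) (out : Bool) : Prop := out = in_improvement_py_alt s xxs pps nns l i pl
instance (s : Int) (xxs : List Int) (pps : List Int) (nns : List Int) (l : Int) (i : Int) (pl : Int) (out : Bool) : Decidable (Spec_in_improvement_py s xxs pps nns l i pl out) := by unfold Spec_in_improvement_py; infer_instance

-- ===== CLAIM (what is proved, stated in full; the proofs are below) =====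
def Claim_equal_in_improvement_py : Prop := ∀ (s : Int) (xxs : List Int) (pps : List Int) (nns : List Int) (l : Int) (i : Int) (pl : Int), Dom_in_improvement_py s xxs pps nns l i pl → Pre_in_improvement_py s xxs pps nns l i pl → Spec_in_improvement_py s xxs pps nns l i pl (in_improvement_py s xxs pps nns l i pl)

-- ===== LEMMAS AND PROOFS =====

-- both A functions coincide with pvLoop in the corresponding state, by strong induction on xxs
lemma both_eq : ∀ N : Nat,
    (∀ (xxs pps nns : List Int) (l i pl : Int), xxs.length ≤ N →
      calc_one_move_improvable xxs pps nns l i pl = pvLoop (.cal l) xxs pps nns i pl)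
    ∧ (∀ (s : Int) (xxs pps nns : List Int) (l i pl : Int), xxs.length ≤ N →
      in_improvement_py s xxs pps nns l i pl = pvLoop (.imp s l) xxs pps nns i pl) := by
  intro N
  induction N with
  | zero =>
    constructor
    · intro xxs pps nns l i pl hlen
      match xxs with
      | [] => rw [calc_one_move_improvable.eq_def, pvLoop.eq_def]
      | x :: xs => simp at hlen
    · intro s xxs pps nns l i pl hlen
      match xxs with
      | [] => rw [in_improvement_py.eq_def, pvLoop.eq_def]
      | x :: xs => simp at hlen
  | succ N ih =>
    obtain ⟨ihc, ihi⟩ := ih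
    have hcalc : ∀ (xxs pps nns : List Int) (l i pl : Int), xxs.length ≤ N + 1 →
        calc_one_move_improvable xxs pps nns l i pl = pvLoop (.cal l) xxs pps nns i pl := by
      intro xxs pps nns l i pl hlen
      match xxs with
      | [] => rw [calc_one_move_improvable.eq_def, pvLoop.eq_def]
      | x :: xs =>
        simp only [List.length_cons] at hlen
        have hxs : xs.length ≤ N := by omega
        rw [calc_one_move_improvable.eq_def, pvLoop.eq_def]
        simp only []
        split_ifs with h1 h2 h3
        · rfl
        · exact ihc xs pps.tail nns.tail (l - 1) i pl hxs
        · exact ihi 0 xs pps.tail nns.tail l i pl hxs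
        · exact ihc xs pps.tail nns.tail i i pl hxs
    refine ⟨hcalc, ?_⟩
    intro s xxs pps nns l i pl hlen
    match xxs with
    | [] => rw [in_improvement_py.eq_def, pvLoop.eq_def]
    | x :: xs =>
      simp only [List.length_cons] at hlen
      rw [in_improvement_py.eq_def, pvLoop.eq_def]
      simp only []
      split_ifs with h1 h2 h3
      · rfl
      · rfl
      · exact ihi (s + 1) xs pps.tail nns.tail l i pl (by omega)
      · exact hcalc (x :: xs) pps nns i i pl (by simp only [List.length_cons]; omega)

-- ===== VERDICT (by name: the statement is the Claim_ definition above) =====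
theorem in_improvement_py_spec : Claim_equal_in_improvement_py := by
  intro s xxs pps nns l i pl _ _
  unfold Spec_in_improvement_py in_improvement_py_alt
  exact (both_eq xxs.length).2 s xxs pps nns l i pl (le_refl _)
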